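-- pv_equiv track=rewrite | github.com/RuthraVed/hackerearth-practice-solutions | hackerearth-practice-solutions/max_tweet_user.py | max_tweet_user
-- ===== SOURCE A (Python) =====
-- from collections import Counter
--
-- def max_tweet_user(tweets_list):
--     tweets_list.sort()  # Sorts the list alphabetically
--     tweets_count_dict = dict(Counter(tweets_list))  # Prepares a dict of tweets-count per individual
--
--     max_count = 0
--     display_list = []
--
--     # First iteration to find the max_count
--     for user, count in tweets_count_dict.items():
--         if count > max_count:
--             max_count = count
--
--     # Second iteration to print the user as desired by the program
--     for user, count in tweets_count_dict.items():
--         if count == max_count: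
--             display_list.append(user + ' ' + str(count))
--
--     return display_list
-- ===== SOURCE B (Python) =====
-- def _flush(user, run, max_count, winners):
--     if run > max_count:
--         return run, [user + ' ' + str(run)]
--     if run == max_count:
--         winners.append(user + ' ' + str(run))
--     return max_count, winners
--
--
-- def max_tweet_user(tweets_list):
--     tweets_list.sort()  # same in-place sort (side effect) as the original
--     max_count = 0
--     winners = []
--     cur = None
--     run = 0
--     for u in tweets_list:
--         if cur == u:
--             run += 1
--         else:
--             if cur is not None:
--                 max_count, winners = _flush(cur, run, max_count, winners)
--             cur = u
--             run = 1
--     if cur is not None: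
--         max_count, winners = _flush(cur, run, max_count, winners)
--     return winners
-- ===== Notes on version B (the rewrite author's own statement) =====
-- stated objective: simpler
-- what changed: Replaces Counter plus two scans over the dict with a single run-walk over the sorted list that maintains the max count and the winners list online (no dict at all).
import Mathlib
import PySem

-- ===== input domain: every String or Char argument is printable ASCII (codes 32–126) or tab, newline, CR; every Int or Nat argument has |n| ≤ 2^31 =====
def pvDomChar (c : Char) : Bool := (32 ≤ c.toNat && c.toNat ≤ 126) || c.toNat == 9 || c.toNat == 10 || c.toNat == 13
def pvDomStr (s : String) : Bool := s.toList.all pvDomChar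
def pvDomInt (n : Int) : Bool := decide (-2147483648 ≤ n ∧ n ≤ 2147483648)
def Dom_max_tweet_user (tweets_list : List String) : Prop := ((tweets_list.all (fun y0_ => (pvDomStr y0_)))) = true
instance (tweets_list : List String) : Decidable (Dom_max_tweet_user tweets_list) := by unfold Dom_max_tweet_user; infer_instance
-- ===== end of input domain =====

-- B replaces Counter plus two dict scans by a single run-walk over the sorted list (simpler, no dict);
-- both versions sort the argument in place in Python — the equivalence proved here is about the return value.

-- ===== PORT A =====
def max_tweet_user (tweets_list : List String) : List String :=
  let s := PySem.List.sorted tweets_list (fun x => x) false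
  let d := PySem.Dict.counter s
  let max_count := d.items.foldl (fun m p => if p.2 > m then p.2 else m) (0 : Int)
  d.items.foldl
    (fun acc p => if p.2 == max_count then acc ++ [p.1 ++ " " ++ PySem.Int.toStr p.2] else acc)
    ([] : List String)

-- ===== PORT B =====
-- _flush from Source B
def mtuFlush (user : String) (run : Int) (max_count : Int) (winners : List String) :
    Int × List String :=
  if run > max_count then (run, [user ++ " " ++ PySem.Int.toStr run])
  else if run == max_count then (max_count, winners ++ [user ++ " " ++ PySem.Int.toStr run])
  else (max_count, winners)

-- one iteration of Source B's for-loop (state: cur, run, max_count, winners)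
def mtuStep (st : Option String × Int × Int × List String) (u : String) :
    Option String × Int × Int × List String :=
  match st with
  | (cur, run, m, ws) =>
    if cur == some u then (cur, run + 1, m, ws)
    else
      match cur with
      | some c =>
        let p := mtuFlush c run m ws
        (some u, 1, p.1, p.2)
      | none => (some u, 1, m, ws)

def max_tweet_user_alt (tweets_list : List String) : List String :=
  let s := PySem.List.sorted tweets_list (fun x => x) false
  match s.foldl mtuStep (none, 0, 0, []) with
  | (some c, run, m, ws) => (mtuFlush c run m ws).2
  | (none, _, _, ws) => ws

-- ===== PRECONDITION & SPEC =====
def Spec_max_tweet_user (tweets_list : List String) (out : List String) : Prop := out = max_tweet_user_alt tweets_list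
instance (tweets_list : List String) (out : List String) : Decidable (Spec_max_tweet_user tweets_list out) := by unfold Spec_max_tweet_user; infer_instance

-- ===== CLAIM (what is proved, stated in full; the proofs are below) =====
def Claim_equal_max_tweet_user : Prop := ∀ (tweets_list : List String), Dom_max_tweet_user tweets_list → Spec_max_tweet_user tweets_list (max_tweet_user tweets_list)

-- ===== LEMMAS AND PROOFS =====

-- formatted output of one (user, count) pair
def mtuFmt (p : String × Int) : String := p.1 ++ " " ++ PySem.Int.toStr p.2

-- run decomposition of a list: (user, length of consecutive run)
def mtuRuns : List String → List (String × Int)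
  | [] => []
  | x :: xs =>
    (x, ((xs.takeWhile (· == x)).length : Int) + 1) :: mtuRuns (xs.dropWhile (· == x))
termination_by l => l.length
decreasing_by
  simp only [List.length_cons]
  exact Nat.lt_succ_of_le (List.length_dropWhile_le _ _)

-- run decomposition with an open current run (user c, count so far r)
def mtuRunsC (c : String) (r : Int) (s : List String) : List (String × Int) :=
  (c, r + ((s.takeWhile (· == c)).length : Int)) :: mtuRuns (s.dropWhile (· == c))

-- online pass over runs: fold mtuFlush
def mtuOnline : List (String × Int) → Int → List String → Int × List String
  | [], m, ws => (m, ws)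
  | (u, n) :: t, m, ws =>
    let p := mtuFlush u n m ws
    mtuOnline t p.1 p.2

-- the final flush of Source B
def mtuFinish (st : Option String × Int × Int × List String) : List String :=
  match st with
  | (some c, run, m, ws) => (mtuFlush c run m ws).2
  | (none, _, _, ws) => ws

-- A's first loop
def mtuMax (l : List (String × Int)) (m : Int) : Int :=
  l.foldl (fun m p => if p.2 > m then p.2 else m) m

lemma mtuMax_le (l : List (String × Int)) : ∀ m, m ≤ mtuMax l m := by
  induction l with
  | nil => intro m; simp [mtuMax]
  | cons p t ih =>
    intro m
    have h1 : m ≤ (if p.2 > m then p.2 else m) := by split_ifs with h <;> omega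
    calc m ≤ (if p.2 > m then p.2 else m) := h1
      _ ≤ mtuMax t (if p.2 > m then p.2 else m) := ih _

lemma mtuOnline_eq_twopass (l : List (String × Int)) :
    ∀ m ws, (mtuOnline l m ws).2 =
      (if mtuMax l m = m then ws else []) ++ (l.filter (fun p => p.2 == mtuMax l m)).map mtuFmt := by
  induction l with
  | nil => intro m ws; simp [mtuOnline, mtuMax]
  | cons p t ih =>
    obtain ⟨u, n⟩ := p
    intro m ws
    by_cases h1 : n > m
    · have hmax : mtuMax ((u, n) :: t) m = mtuMax t n := by simp [mtuMax, h1]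
      have hne : mtuMax t n ≠ m := by have := mtuMax_le t n; omega
      have hstep : mtuOnline ((u, n) :: t) m ws = mtuOnline t n [mtuFmt (u, n)] := by
        simp [mtuOnline, mtuFlush, h1, mtuFmt]
      rw [hstep, ih n [mtuFmt (u, n)], hmax]
      by_cases h2 : mtuMax t n = n
      · simp only [h2, List.filter_cons]
        have hnm : ¬ n = m := by omega
        simp [hnm]
      · have hth : (n == mtuMax t n) = false := by simp only [beq_eq_false_iff_ne]; omega
        simp [h2, hne, hth]
    · have hmax : mtuMax ((u, n) :: t) m = mtuMax t m := by simp [mtuMax, h1]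
      by_cases h2 : n = m
      · have hstep : mtuOnline ((u, n) :: t) m ws = mtuOnline t m (ws ++ [mtuFmt (u, n)]) := by
          simp [mtuOnline, mtuFlush, h2, mtuFmt]
        rw [hstep, ih m (ws ++ [mtuFmt (u, n)]), hmax]
        by_cases h3 : mtuMax t m = m
        · have hn : (n == mtuMax t m) = true := by simp only [beq_iff_eq]; omega
          simp [h3, h2]
        · have hn : (n == mtuMax t m) = false := by
            have := mtuMax_le t m; simp only [beq_eq_false_iff_ne]; omega
          simp [h3, hn]
      · have hstep : mtuOnline ((u, n) :: t) m ws = mtuOnline t m ws := by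
          simp [mtuOnline, mtuFlush, h1, h2]
        rw [hstep, ih m ws, hmax]
        have hn : (n == mtuMax t m) = false := by
          have := mtuMax_le t m; simp only [beq_eq_false_iff_ne]; omega
        simp [hn]

lemma mtuFoldB (s : List String) :
    ∀ c r m ws, mtuFinish (s.foldl mtuStep (some c, r, m, ws)) = (mtuOnline (mtuRunsC c r s) m ws).2 := by
  induction s with
  | nil =>
    intro c r m ws
    simp [mtuFinish, mtuRunsC, mtuRuns, mtuOnline]
  | cons y t ih =>
    intro c r m ws
    by_cases h : y = c
    · subst h
      have hstep : mtuStep (some y, r, m, ws) y = (some y, r + 1, m, ws) := by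
        simp [mtuStep]
      have hruns : mtuRunsC y r (y :: t) = mtuRunsC y (r + 1) t := by
        simp only [mtuRunsC, List.takeWhile_cons, List.dropWhile_cons, BEq.rfl,
          if_pos, List.length_cons]
        congr 2
        push_cast
        ring
      rw [List.foldl_cons, hstep, ih, hruns]
    · have hcy : ¬ c = y := fun hh => h hh.symm
      have hbeq : (y == c) = false := by simp only [beq_eq_false_iff_ne]; exact h
      have hstep : mtuStep (some c, r, m, ws) y =
          (some y, 1, (mtuFlush c r m ws).1, (mtuFlush c r m ws).2) := by
        simp [mtuStep, hcy]
      have hruns : mtuRuns (y :: t) = mtuRunsC y 1 t := by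
        simp only [mtuRuns, mtuRunsC]
        congr 2
        ring
      have hrunsC : mtuRunsC c r (y :: t) = (c, r) :: mtuRunsC y 1 t := by
        rw [← hruns]
        simp [mtuRunsC, hbeq]
      rw [List.foldl_cons, hstep, ih, hrunsC]
      simp [mtuOnline]

-- folding Set.add keeps a fresh front element in front
lemma mtuAdd_cons (x : String) (l : List String) (hx : x ∉ l) :
    ∀ acc : List String, l.foldl PySem.Set.add (x :: acc) = x :: l.foldl PySem.Set.add acc := by
  induction l with
  | nil => intro acc; rfl
  | cons y t ih =>
    intro acc
    have hy : (y == x) = false := by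
      simp only [beq_eq_false_iff_ne]
      intro hh; exact hx (hh ▸ List.mem_cons_self)
    have hx' : x ∉ t := fun hh => hx (List.mem_cons_of_mem _ hh)
    have hadd : PySem.Set.add (x :: acc) y = x :: PySem.Set.add acc y := by
      simp only [PySem.Set.add, PySem.Set.contains, List.contains_cons, hy, Bool.false_or]
      split_ifs <;> simp
    rw [List.foldl_cons, hadd, List.foldl_cons, ih hx']

lemma mtuAdd_const (x : String) (l : List String) (hl : ∀ y ∈ l, y = x) :
    l.foldl PySem.Set.add [x] = [x] := by
  induction l with
  | nil => rfl
  | cons y t ih =>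
    have hy : y = x := hl y List.mem_cons_self
    have hadd : PySem.Set.add [x] y = [x] := by
      subst hy; simp [PySem.Set.add, PySem.Set.contains]
    rw [List.foldl_cons, hadd]
    exact ih (fun z hz => hl z (List.mem_cons_of_mem _ hz))

-- the element a dropWhile stops at fails the predicate (equation form of List.head_dropWhile_not)
lemma mtuDropWhile_head (p : String → Bool) (xs : List String) (h : String) (t : List String)
    (heq : xs.dropWhile p = h :: t) : p h = false := by
  induction xs with
  | nil => simp at heq
  | cons y ys ih =>
    rw [List.dropWhile_cons] at heq
    split at heq
    · exact ih heq
    · next hp => cases heq; simpa using hp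

lemma mtuCounter_runs (s : List String) (hs : s.Pairwise (· ≤ ·)) :
    (PySem.Set.ofList s).map (fun k => (k, (s.count k : Int))) = mtuRuns s := by
  induction s using mtuRuns.induct with
  | case1 => simp [PySem.Set.ofList_eq_foldl, mtuRuns]
  | case2 x xs ih =>
    set tw := xs.takeWhile (· == x) with htw
    set dr := xs.dropWhile (· == x) with hdr
    have hxs : tw ++ dr = xs := List.takeWhile_append_dropWhile
    have htwx : ∀ y ∈ tw, y = x := fun y hy => by
      have := List.mem_takeWhile_imp hy
      exact eq_of_beq this
    have hpxs : xs.Pairwise (· ≤ ·) := (List.pairwise_cons.mp hs).2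
    have hxle : ∀ y ∈ xs, x ≤ y := (List.pairwise_cons.mp hs).1
    have hxdr : x ∉ dr := by
      intro hmem
      cases hdrc : dr with
      | nil => rw [hdrc] at hmem; exact absurd hmem (List.not_mem_nil)
      | cons h t =>
        have hph : (h == x) = false := mtuDropWhile_head (· == x) xs h t (hdr ▸ hdrc)
        have hhx : h ≠ x := by simpa using hph
        have hpdr : dr.Pairwise (· ≤ ·) :=
          hpxs.sublist (hdr ▸ List.dropWhile_sublist _)
        rw [hdrc] at hmem hpdr
        rcases List.mem_cons.mp hmem with h1 | h1
        · exact hhx h1.symm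
        · have hle1 : h ≤ x := (List.pairwise_cons.mp hpdr).1 x h1
          have hle2 : x ≤ h := hxle h (by
            rw [← hxs, hdrc]; exact List.mem_append_right _ List.mem_cons_self)
          exact hhx (le_antisymm hle1 hle2)
    have hkeys : PySem.Set.ofList (x :: xs) = x :: PySem.Set.ofList dr := by
      rw [PySem.Set.ofList_eq_foldl, PySem.Set.ofList_eq_foldl]
      rw [List.foldl_cons]
      have h0 : PySem.Set.add ([] : List String) x = [x] := by
        simp [PySem.Set.add, PySem.Set.contains]
      rw [h0, ← hxs, List.foldl_append, mtuAdd_const x tw htwx, mtuAdd_cons x dr hxdr]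
    have hcx : (x :: xs).count x = tw.length + 1 := by
      have h1 : tw.count x = tw.length := List.count_eq_length.mpr (fun b hb => (htwx b hb).symm)
      have h2 : dr.count x = 0 := List.count_eq_zero.mpr hxdr
      rw [List.count_cons, ← hxs, List.count_append, h1, h2]
      simp
    have hcdr : ∀ k ∈ PySem.Set.ofList dr,
        (fun k => (k, ((x :: xs).count k : Int))) k = (fun k => (k, (dr.count k : Int))) k := by
      intro k hk
      have hkdr : k ∈ dr := (PySem.Set.mem_ofList dr k).mp hk
      have hkx : k ≠ x := fun hh => hxdr (hh ▸ hkdr)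
      have h1 : tw.count k = 0 := List.count_eq_zero.mpr (fun hh => hkx (htwx k hh))
      have hxk : (x == k) = false := by
        simp only [beq_eq_false_iff_ne]; exact fun hh => hkx hh.symm
      simp only [List.count_cons, ← hxs, List.count_append, h1, hxk]
      simp
    have hpdr : dr.Pairwise (· ≤ ·) := hpxs.sublist (hdr ▸ List.dropWhile_sublist _)
    rw [hkeys, List.map_cons, List.map_congr_left hcdr, ih hpdr]
    show (x, ((x :: xs).count x : Int)) :: mtuRuns dr = mtuRuns (x :: xs)
    rw [mtuRuns, hcx]
    simp [← htw, ← hdr]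

-- ===== VERDICT (by name: the statement is the Claim_ definition above) =====
theorem max_tweet_user_spec : Claim_equal_max_tweet_user := by
  unfold Claim_equal_max_tweet_user
  intro ts _
  unfold Spec_max_tweet_user max_tweet_user max_tweet_user_alt
  set s := PySem.List.sorted ts (fun x => x) false with hs
  have hpair : s.Pairwise (· ≤ ·) := PySem.List.sorted_pairwise ts _
  have hitems : (PySem.Dict.counter s).items = mtuRuns s := by
    rw [PySem.Dict.items_counter]
    exact mtuCounter_runs s hpair
  have hA : ∀ (l : List (String × Int)) (M : Int),
      List.foldl (fun acc p => if p.2 == M then acc ++ [p.1 ++ " " ++ PySem.Int.toStr p.2] else acc)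
        ([] : List String) l = List.map mtuFmt (List.filter (fun p => p.2 == M) l) := by
    intro l M
    simpa [mtuFmt] using PySem.List.foldl_append_if (fun p : String × Int => p.2 == M) mtuFmt l []
  simp only [hitems, hA]
  cases hsc : s with
  | nil => simp [mtuRuns]
  | cons x t =>
    have hstep0 : mtuStep (none, 0, 0, []) x = (some x, 1, 0, []) := by
      simp [mtuStep]
    show List.map mtuFmt
        (List.filter
          (fun p => p.2 == List.foldl (fun m p => if p.2 > m then p.2 else m) 0 (mtuRuns (x :: t)))
          (mtuRuns (x :: t))) =
      mtuFinish (List.foldl mtuStep (none, 0, 0, []) (x :: t))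
    rw [List.foldl_cons, hstep0, mtuFoldB]
    have hruns : mtuRunsC x 1 t = mtuRuns (x :: t) := by
      simp only [mtuRunsC, mtuRuns]
      congr 2
      ring
    rw [hruns, mtuOnline_eq_twopass]
    simp [mtuMax]
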